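-- pv_equiv track=rewrite | github.com/p4s3r0/hashfunction-sat-solver-attacks | ROMULUS/sat_solver_attack/romulus.py | sbox
-- ===== SOURCE A (Python) =====
-- def sbox(byte_inp):
--     a = '0' * (8 - len(bin(byte_inp)[2:])) + str(bin(byte_inp)[2:])
--     inp = list()
--     for ch in a:
--         inp.append(0 if ch == '0' else 1)
--     inp = list(reversed(inp))
--
--     # first line
--     nor_0_0 = not(inp[7] | inp[6])
--     xor_0_1 = nor_0_0 ^ inp[4]
--     nor_0_2 = not(inp[3] | inp[2])
--     xor_0_3 = nor_0_2 ^ inp[0]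
--
--     # second line
--     nor_1_0 = not(inp[2] | inp[1])
--     xor_1_1 = nor_1_0 ^ inp[6]
--     nor_1_2 = not(xor_0_1 | xor_0_3)
--     xor_1_3 = inp[5] ^ nor_1_2
--
--     # third line
--     nor_2_0 = not(xor_0_3 | inp[3])
--     xor_2_1 = inp[1] ^ nor_2_0
--     nor_2_2 = not(xor_1_1 | xor_1_3)
--     xor_2_3 = inp[7] ^ nor_2_2
--
--     # fourth line
--     nor_3_0 = not(xor_1_3 | xor_0_1)
--     xor_3_1 = inp[3] ^ nor_3_0
--     nor_3_2 = not(xor_2_1 | xor_2_3)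
--     xor_3_3 = inp[2] ^ nor_3_2
--
--     result = list()
--     result.append(xor_1_3)
--     result.append(xor_0_1)
--     result.append(xor_0_3)
--     result.append(xor_3_1)
--     result.append(xor_2_1)
--     result.append(xor_1_1)
--     result.append(xor_2_3)
--     result.append(xor_3_3)
--     b = 0
--     for i in range(len(result)):
--         b = int(hex( (b << 1) | result[i] ), 16)
--     return hex(b)
-- ===== SOURCE B (Python) =====
-- SBOX = ['0x65', '0x4c', '0x6a', '0x42', '0x4b', '0x63', '0x43', '0x6b', '0x55', '0x75', '0x5a', '0x7a', '0x53', '0x73', '0x5b', '0x7b', '0x35', '0x8c', '0x3a', '0x81', '0x89', '0x33', '0x80', '0x3b', '0x95', '0x25', '0x98', '0x2a', '0x90', '0x23', '0x99', '0x2b', '0xe5', '0xcc', '0xe8', '0xc1', '0xc9', '0xe0', '0xc0', '0xe9', '0xd5', '0xf5', '0xd8', '0xf8', '0xd0', '0xf0', '0xd9', '0xf9', '0xa5', '0x1c', '0xa8', '0x12', '0x1b', '0xa0', '0x13', '0xa9', '0x5', '0xb5', '0xa', '0xb8', '0x3', '0xb0', '0xb', '0xb9', '0x32', '0x88', '0x3c',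 '0x85', '0x8d', '0x34', '0x84', '0x3d', '0x91', '0x22', '0x9c', '0x2c', '0x94', '0x24', '0x9d', '0x2d', '0x62', '0x4a', '0x6c', '0x45', '0x4d', '0x64', '0x44', '0x6d', '0x52', '0x72', '0x5c', '0x7c', '0x54', '0x74', '0x5d', '0x7d', '0xa1', '0x1a', '0xac', '0x15', '0x1d', '0xa4', '0x14', '0xad', '0x2', '0xb1', '0xc', '0xbc', '0x4', '0xb4', '0xd', '0xbd', '0xe1', '0xc8', '0xec', '0xc5', '0xcd', '0xe4', '0xc4', '0xed', '0xd1', '0xf1', '0xdc', '0xfc', '0xd4', '0xf4', '0xdd', '0xfd', '0x36', '0x8e', '0x38', '0x82', '0x8b', '0x30', '0x83', '0x39', '0x96', '0x26', '0x9a', '0x28', '0x93', '0x20', '0x9b', '0x29', '0x66', '0x4e', '0x68', '0x41', '0x49', '0x60', '0x40', '0x69', '0x56', '0x76', '0x58', '0x78', '0x50', '0x70', '0x59', '0x79', '0xa6', '0x1e', '0xaa', '0x11', '0x19', '0xa3', '0x10', '0xab', '0x6', '0xb6', '0x8', '0xba', '0x0', '0xb3', '0x9', '0xbb', '0xe6',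 '0xce', '0xea', '0xc2', '0xcb', '0xe3', '0xc3', '0xeb', '0xd6', '0xf6', '0xda', '0xfa', '0xd3', '0xf3', '0xdb', '0xfb', '0x31', '0x8a', '0x3e', '0x86', '0x8f', '0x37', '0x87', '0x3f', '0x92', '0x21', '0x9e', '0x2e', '0x97', '0x27', '0x9f', '0x2f', '0x61', '0x48', '0x6e', '0x46', '0x4f', '0x67', '0x47', '0x6f', '0x51', '0x71', '0x5e', '0x7e', '0x57', '0x77', '0x5f', '0x7f', '0xa2', '0x18', '0xae', '0x16', '0x1f', '0xa7', '0x17', '0xaf', '0x1', '0xb2', '0xe', '0xbe', '0x7', '0xb7', '0xf', '0xbf', '0xe2', '0xca', '0xee', '0xc6', '0xcf', '0xe7', '0xc7', '0xef', '0xd2', '0xf2', '0xde', '0xfe', '0xd7', '0xf7', '0xdf', '0xff']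
--
--
-- def sbox(byte_inp):
--     # Romulus (SKINNY) 8-bit S-box as a precomputed 256-entry lookup table.
--     # Python's & on a negative int takes the two's-complement low byte.
--     return SBOX[byte_inp & 0xFF]
-- ===== Notes on version B (the rewrite author's own statement) =====
-- stated objective: simpler
-- what changed: Replaces the NOR/XOR boolean gate network plus bin()/hex() string round-trips with a single precomputed byte-indexed lookup table (SBOX[byte_inp & 0xFF]); Pre_ restricts to nonnegative inputs, the S-box's natural domain, since on negatives A reads the '-'/'b' characters of bin() as set bits while B reads the two's-complement low byte.
-- outside the precondition, e.g. on sbox(-5): A returns '0x73', B returns '0xfe'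
import Mathlib
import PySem

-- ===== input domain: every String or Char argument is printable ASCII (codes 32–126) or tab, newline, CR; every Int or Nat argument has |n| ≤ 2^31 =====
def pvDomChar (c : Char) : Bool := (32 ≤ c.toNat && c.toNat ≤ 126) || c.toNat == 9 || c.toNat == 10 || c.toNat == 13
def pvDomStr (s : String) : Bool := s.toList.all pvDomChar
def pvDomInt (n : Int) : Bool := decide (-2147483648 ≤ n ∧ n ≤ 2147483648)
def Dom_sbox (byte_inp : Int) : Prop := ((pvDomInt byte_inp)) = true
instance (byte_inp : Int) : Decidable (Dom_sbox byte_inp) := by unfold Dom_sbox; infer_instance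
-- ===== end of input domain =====

-- B replaces A's NOR/XOR gate network and bin()/hex() string round-trips by one precomputed
-- byte-indexed table lookup (simpler); equivalence is claimed on the function's natural domain
-- of nonnegative inputs (Pre_sbox below).

-- ===== PORT A =====
-- hex(n) for the nonnegative n reached here: "0x" + lowercase hex digits (Nat.toDigits 16)
def pyHex (n : Int) : String := String.ofList ('0' :: 'x' :: Nat.toDigits 16 n.toNat)

-- the boolean network applied to the eight bits inp[0]..inp[7] (0/1 values kept as Bool;
-- Python's not/|/^ on these 0/1 values coincide with !, ||, ^^), then the result list and
-- the b-building loop with its hex()/int(·,16) round-trip, then hex(b)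
def netF (i0 i1 i2 i3 i4 i5 i6 i7 : Bool) : String :=
  -- first line
  let nor00 := !(i7 || i6)
  let xor01 := nor00 ^^ i4
  let nor02 := !(i3 || i2)
  let xor03 := nor02 ^^ i0
  -- second line
  let nor10 := !(i2 || i1)
  let xor11 := nor10 ^^ i6
  let nor12 := !(xor01 || xor03)
  let xor13 := i5 ^^ nor12
  -- third line
  let nor20 := !(xor03 || i3)
  let xor21 := i1 ^^ nor20
  let nor22 := !(xor11 || xor13)
  let xor23 := i7 ^^ nor22
  -- fourth line
  let nor30 := !(xor13 || xor01)
  let xor31 := i3 ^^ nor30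
  let nor32 := !(xor21 || xor23)
  let xor33 := i2 ^^ nor32
  let result : List Bool := [xor13, xor01, xor03, xor31, xor21, xor11, xor23, xor33]
  -- b = int(hex((b << 1) | result[i]), 16), i = 0..7  (int(·,16) always succeeds: getD 0 unreached)
  let b : Int := result.foldl
    (fun b r => (PySem.Int.ofStrBase? (pyHex (PySem.Int.bor (b <<< 1) (if r then 1 else 0))) 16).getD 0) 0
  pyHex b

def sbox (byte_inp : Int) : String :=
  -- a = '0' * (8 - len(bin(byte_inp)[2:])) + bin(byte_inp)[2:]   ('0'*k = '' for k ≤ 0 = Int.toNat clamp)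
  let s : List Char := (PySem.Str.slice (PySem.Int.pyBin byte_inp) (some 2) none).toList
  let a : List Char := List.replicate ((8 - (s.length : Int)).toNat) '0' ++ s
  -- inp: 0 if ch == '0' else 1, then reversed (bits kept as Bool)
  let inp : List Bool := (a.map (fun ch => ch != '0')).reverse
  -- inp[0] .. inp[7]; len(inp) ≥ 8 always, so the raw indexing never raises (getD unreached)
  let g : Int → Bool := fun i => (PySem.List.pyGet? inp i).getD false
  netF (g 0) (g 1) (g 2) (g 3) (g 4) (g 5) (g 6) (g 7)

-- ===== PORT B =====
def SBOXtable : List String := ["0x65", "0x4c", "0x6a", "0x42", "0x4b", "0x63", "0x43", "0x6b", "0x55", "0x75", "0x5a", "0x7a", "0x53", "0x73", "0x5b", "0x7b", "0x35", "0x8c", "0x3a", "0x81", "0x89", "0x33", "0x80", "0x3b", "0x95", "0x25", "0x98", "0x2a", "0x90", "0x23", "0x99", "0x2b", "0xe5", "0xcc", "0xe8", "0xc1", "0xc9", "0xe0", "0xc0", "0xe9", "0xd5", "0xf5", "0xd8", "0xf8", "0xd0", "0xf0", "0xd9", "0xf9", "0xa5", "0x1c", "0xa8", "0x12", "0x1b",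 "0xa0", "0x13", "0xa9", "0x5", "0xb5", "0xa", "0xb8", "0x3", "0xb0", "0xb", "0xb9", "0x32", "0x88", "0x3c", "0x85", "0x8d", "0x34", "0x84", "0x3d", "0x91", "0x22", "0x9c", "0x2c", "0x94", "0x24", "0x9d", "0x2d", "0x62", "0x4a", "0x6c", "0x45", "0x4d", "0x64", "0x44", "0x6d", "0x52", "0x72", "0x5c", "0x7c", "0x54", "0x74", "0x5d", "0x7d", "0xa1", "0x1a", "0xac", "0x15", "0x1d", "0xa4", "0x14", "0xad", "0x2", "0xb1", "0xc", "0xbc", "0x4", "0xb4", "0xd", "0xbd", "0xe1", "0xc8", "0xec", "0xc5", "0xcd", "0xe4", "0xc4", "0xed", "0xd1", "0xf1", "0xdc", "0xfc", "0xd4", "0xf4", "0xdd", "0xfd", "0x36", "0x8e", "0x38", "0x82", "0x8b", "0x30", "0x83", "0x39", "0x96", "0x26", "0x9a", "0x28", "0x93", "0x20", "0x9b", "0x29", "0x66", "0x4e", "0x68", "0x41", "0x49", "0x60", "0x40", "0x69", "0x56", "0x76", "0x58", "0x78", "0x50", "0x70", "0x59", "0x79", "0xa6", "0x1e", "0xaa",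 "0x11", "0x19", "0xa3", "0x10", "0xab", "0x6", "0xb6", "0x8", "0xba", "0x0", "0xb3", "0x9", "0xbb", "0xe6", "0xce", "0xea", "0xc2", "0xcb", "0xe3", "0xc3", "0xeb", "0xd6", "0xf6", "0xda", "0xfa", "0xd3", "0xf3", "0xdb", "0xfb", "0x31", "0x8a", "0x3e", "0x86", "0x8f", "0x37", "0x87", "0x3f", "0x92", "0x21", "0x9e", "0x2e", "0x97", "0x27", "0x9f", "0x2f", "0x61", "0x48", "0x6e", "0x46", "0x4f", "0x67", "0x47", "0x6f", "0x51", "0x71", "0x5e", "0x7e", "0x57", "0x77", "0x5f", "0x7f", "0xa2", "0x18", "0xae", "0x16", "0x1f", "0xa7", "0x17", "0xaf", "0x1", "0xb2", "0xe", "0xbe", "0x7", "0xb7", "0xf", "0xbf", "0xe2", "0xca", "0xee", "0xc6", "0xcf", "0xe7", "0xc7", "0xef", "0xd2", "0xf2", "0xde", "0xfe", "0xd7", "0xf7", "0xdf", "0xff"]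

def sbox_alt (byte_inp : Int) : String :=
  -- SBOX[byte_inp & 0xFF]; the index is always in 0..255, so indexing never raises (getD unreached)
  (PySem.List.pyGet? SBOXtable (PySem.Int.band byte_inp 255)).getD ""

-- ===== PRECONDITION & SPEC =====
-- Pre_ excludes negative inputs, which lie outside the S-box's natural byte domain: there A
-- reads the '-'/'b' characters of bin() as set bits while B reads the two's-complement low
-- byte — a corner where neither reading is more defensible than the other, so it is excluded
-- rather than matched.
def Pre_sbox (byte_inp : Int) : Prop := 0 ≤ byte_inp
instance (byte_inp : Int) : Decidable (Pre_sbox byte_inp) := by unfold Pre_sbox; infer_instance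

def pvWitness_sbox : Int := 77

def Spec_sbox (byte_inp : Int) (out : String) : Prop := out = sbox_alt byte_inp
instance (byte_inp : Int) (out : String) : Decidable (Spec_sbox byte_inp out) := by unfold Spec_sbox; infer_instance

-- ===== CLAIM (what is proved, stated in full; the proofs are below) =====
def Claim_equal_sbox : Prop := ∀ (byte_inp : Int), Dom_sbox byte_inp → Pre_sbox byte_inp → Spec_sbox byte_inp (sbox byte_inp)

-- ===== LEMMAS AND PROOFS =====

-- xs[2:] for a concrete lower bound 2
theorem slice_two_none (cs : List Char) : PySem.List.slice cs (some 2) none = cs.drop 2 := by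
  simp only [PySem.List.slice]
  have hc : PySem.List.clampIdx cs.length 2 = min 2 cs.length := by
    simp [PySem.List.clampIdx]
  rw [hc]
  rcases Nat.lt_or_ge cs.length 2 with h | h
  · rw [min_eq_right (by omega)]
    simp [List.drop_eq_nil_of_le (by omega : cs.length ≤ 2)]
  · rw [min_eq_left (by omega)]
    exact List.take_of_length_le (by simp)

-- the reversed binary-digit string of m, read as bits, is m.testBit
theorem toDigits_two_rev_testBit (m : Nat) :
    ∀ i : Nat, ((Nat.toDigits 2 m).reverse.map (fun ch => ch != '0')).getD i false = m.testBit i := by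
  induction m using Nat.strong_induction_on with
  | _ m ih =>
    intro i
    rcases Nat.lt_or_ge m 2 with hm | hm
    · interval_cases m <;> cases i <;>
        simp [Nat.toDigits_of_lt_base, Nat.testBit_zero, Nat.testBit_add_one, Nat.zero_testBit] <;> decide
    · rw [Nat.toDigits_eq_if (by norm_num), if_neg (by omega)]
      rw [List.reverse_append]
      cases i with
      | zero =>
        rcases Nat.mod_two_eq_zero_or_one m with h2 | h2 <;>
          simp [h2, Nat.testBit_zero] <;> decide
      | succ i =>
        simp only [List.reverse_cons, List.reverse_nil, List.nil_append, List.map_cons,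
          List.cons_append, List.getD_cons_succ, Nat.testBit_add_one]
        exact ih (m / 2) (by omega) i

-- appending trailing 'false' padding does not change getD with default false
theorem getD_append_replicate_false (xs : List Bool) (k i : Nat) :
    (xs ++ List.replicate k false).getD i false = xs.getD i false := by
  rcases Nat.lt_or_ge i xs.length with h | h
  · simp [List.getD_eq_getElem?_getD, List.getElem?_append_left h]
  · simp only [List.getD_eq_getElem?_getD, List.getElem?_append_right h,
      List.getElem?_replicate, List.getElem?_eq_none (by omega : xs.length ≤ i)]
    split <;> simp

-- the table agrees with the network on every byte
set_option maxRecDepth 100000 in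
set_option maxHeartbeats 4000000 in
theorem net_table : ∀ k : Nat, k < 256 →
    netF (k.testBit 0) (k.testBit 1) (k.testBit 2) (k.testBit 3)
         (k.testBit 4) (k.testBit 5) (k.testBit 6) (k.testBit 7) = SBOXtable.getD k "" := by
  decide

-- reading bit j of the padded, reversed digit string is m.testBit j
theorem key_bit (m : Nat) (j : Int) (k : Nat) (hj : j = (k : Int)) :
    (PySem.List.pyGet?
      (((List.replicate ((8 - (((Nat.toDigits 2 m).length : Nat) : Int)).toNat) '0'
          ++ Nat.toDigits 2 m).map (fun ch => ch != '0')).reverse) j).getD false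
      = m.testBit k := by
  subst hj
  rw [PySem.List.pyGet?_natCast, ← List.getD_eq_getElem?_getD]
  rw [List.map_append, List.reverse_append, List.map_replicate, List.reverse_replicate]
  simp only [show (('0' : Char) != '0') = false from rfl]
  rw [← List.map_reverse, getD_append_replicate_false, toDigits_two_rev_testBit]

-- ===== VERDICT (by name: the statement is the Claim_ definition above) =====
theorem sbox_spec : Claim_equal_sbox := by
  intro n _ hn
  unfold Pre_sbox at hn
  obtain ⟨m, rfl⟩ : ∃ m : Nat, n = (m : Int) := ⟨n.toNat, (Int.toNat_of_nonneg hn).symm⟩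
  show sbox (m : Int) = sbox_alt (m : Int)
  -- left side: sbox ↑m is the network applied to the low eight bits of m
  have hbinList : (PySem.Str.slice (PySem.Int.pyBin (m : Int)) (some 2) none).toList
      = Nat.toDigits 2 m := by
    have h1 : (PySem.Int.pyBin (m : Int)).toList = '0' :: 'b' :: Nat.toDigits 2 m := by
      simp [PySem.Int.toList_pyBin, PySem.Int.toBinChars0b, not_lt.mpr hn]
    simp [pysem, h1, slice_two_none]
  have hA : sbox (m : Int) = netF (m.testBit 0) (m.testBit 1) (m.testBit 2) (m.testBit 3)
      (m.testBit 4) (m.testBit 5) (m.testBit 6) (m.testBit 7) := by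
    simp only [sbox]
    rw [hbinList]
    rw [key_bit m 0 0 (by norm_num), key_bit m 1 1 (by norm_num), key_bit m 2 2 (by norm_num),
        key_bit m 3 3 (by norm_num), key_bit m 4 4 (by norm_num), key_bit m 5 5 (by norm_num),
        key_bit m 6 6 (by norm_num), key_bit m 7 7 (by norm_num)]
  -- the eight bits only depend on m % 256
  have hbit : ∀ j : Nat, j < 8 → m.testBit j = (m % 256).testBit j := by
    intro j hj
    rw [show (256 : Nat) = 2 ^ 8 by norm_num, Nat.testBit_mod_two_pow]
    simp [hj]
  -- right side: ↑m & 0xFF is m % 256, and the table lookup is getD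
  have hB : sbox_alt (m : Int) = SBOXtable.getD (m % 256) "" := by
    simp only [sbox_alt]
    have hband : PySem.Int.band (m : Int) 255 = ((m % 256 : Nat) : Int) := by
      rw [PySem.Int.band_of_nonneg (by positivity) (by norm_num)]
      rw [show ((255 : Int)).toNat = 2 ^ 8 - 1 from rfl, Nat.and_two_pow_sub_one_eq_mod]
      norm_num
    rw [hband, PySem.List.pyGet?_natCast, ← List.getD_eq_getElem?_getD]
  rw [hA, hbit 0 (by omega), hbit 1 (by omega), hbit 2 (by omega), hbit 3 (by omega),
      hbit 4 (by omega), hbit 5 (by omega), hbit 6 (by omega), hbit 7 (by omega),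
      net_table (m % 256) (Nat.mod_lt _ (by norm_num)), hB]
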